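-- pv_equiv track=rewrite | github.com/prasadkjose/coding | dynamic_programming/distinct_arrays/distinct_arrays.py | run_solution
-- ===== SOURCE A (Python) =====
-- def run_solution(n):
--     """ Solution Method """
--     # n =2, [[1,1][2]]
--     # n=3, [[1,1,1], [1,2], [2,1]]
--     # n=5, [[1,1,1,1,1], [2,1,1,1], [1,2,1,1], [1,1,2,1], [1,1,1,2],
--     # [2,2,1], [2,1,2], [1,2,2]] 1,1,2,3,5
--
--
--     # The solution is the count of fibanacci.
--     # Recursive with memoization
--     cache = [-1] * (n + 1)
--     # def fib(n: int) -> int: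
--     #     if n <= 2:
--     #         return n
--
--     #     if cache[n] != -1:
--     #         return cache[n]
--
--     #     cache[n] = fib(n - 1) + fib(n - 2)
--     #     return cache[n]
--     # return fib(n)
--
--     # Iterative
--     def iterative(n:int) -> int:
--         if n<=2:
--             return n
--
--         prev1 = 1
--         prev2 = 2
--         # Move the window one step
--         for _ in range(3, n+1):
--             curr = prev1 + prev2
--             prev1 = prev2
--             prev2 = curr
--
--         return prev2
--     return iterative(n)
-- ===== SOURCE B (Python) =====
-- def run_solution(n):
--     """ Solution Method """
--     if n <= 2:
--         return n
--
--     # Fast-doubling Fibonacci: fd(k) = (F(k), F(k+1)) with F(1)=F(2)=1.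
--     def fd(k):
--         if k == 0:
--             return (0, 1)
--         a, b = fd(k >> 1)
--         c = a * (2 * b - a)
--         d = a * a + b * b
--         if k & 1:
--             return (d, c + d)
--         return (c, d)
--
--     # The answer for n is F(n+1).
--     return fd(n + 1)[0]
-- ===== Notes on version B (the rewrite author's own statement) =====
-- stated objective: alternative
-- what changed: Replaces the iterative sliding-window Fibonacci loop with a recursive fast-doubling computation fd(k) = (F(k), F(k+1)), returning F(n+1) directly.
import Mathlib
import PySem

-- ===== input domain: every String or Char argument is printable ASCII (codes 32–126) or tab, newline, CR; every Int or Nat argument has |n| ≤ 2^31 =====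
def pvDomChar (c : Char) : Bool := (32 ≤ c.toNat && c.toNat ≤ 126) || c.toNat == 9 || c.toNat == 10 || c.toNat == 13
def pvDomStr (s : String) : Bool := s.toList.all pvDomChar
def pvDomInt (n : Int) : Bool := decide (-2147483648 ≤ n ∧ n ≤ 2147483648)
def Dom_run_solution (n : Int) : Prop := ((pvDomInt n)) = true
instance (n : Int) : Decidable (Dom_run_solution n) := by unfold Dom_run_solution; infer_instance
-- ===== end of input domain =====

-- B replaces A's iterative Fibonacci window with fast-doubling recursion (a different algorithm for the same value).

-- ===== PORT A =====
-- A's inner 'iterative' helper: the loop over range(3, n+1) as a foldl over the same (prev1, prev2) state.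
def pvIterative (n : Int) : Int :=
  if n ≤ 2 then n
  else
    ((PySem.List.pyRange 3 (n + 1) 1).foldl
      (fun (st : Int × Int) _ => (st.2, st.1 + st.2)) (1, 2)).2

def run_solution (n : Int) : Int := pvIterative n

-- ===== PORT B =====
-- fd(k) = (F(k), F(k+1)) by fast doubling; k >> 1 on a nonnegative Python int is k / 2.
def pvFd (k : Nat) : Int × Int :=
  if h : k = 0 then (0, 1)
  else
    let p := pvFd (k / 2)
    let c := p.1 * (2 * p.2 - p.1)
    let d := p.1 * p.1 + p.2 * p.2
    if k % 2 = 1 then (d, c + d) else (c, d)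
decreasing_by exact Nat.div_lt_self (Nat.pos_of_ne_zero h) (by norm_num)

def run_solution_alt (n : Int) : Int :=
  if n ≤ 2 then n else (pvFd (n + 1).toNat).1

-- ===== PRECONDITION & SPEC =====
def Spec_run_solution (n : Int) (out : Int) : Prop := out = run_solution_alt n
instance (n : Int) (out : Int) : Decidable (Spec_run_solution n out) := by unfold Spec_run_solution; infer_instance

-- ===== CLAIM (what is proved, stated in full; the proofs are below) =====
def Claim_equal_run_solution : Prop := ∀ (n : Int), Dom_run_solution n → Spec_run_solution n (run_solution n)

-- ===== LEMMAS AND PROOFS =====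

-- fast doubling computes Fibonacci
theorem pvFd_eq (k : Nat) : pvFd k = ((Nat.fib k : Int), (Nat.fib (k + 1) : Int)) := by
  induction k using Nat.strong_induction_on with
  | _ k ih =>
    rw [pvFd]
    by_cases h : k = 0
    · simp [h]
    · have hlt : k / 2 < k := Nat.div_lt_self (Nat.pos_of_ne_zero h) (by norm_num)
      rw [dif_neg h, ih _ hlt]
      rcases Nat.even_or_odd k with he | ho
      · obtain ⟨m, hm⟩ := he
        have hk2 : k / 2 = m := by omega
        have hmod : ¬ (k % 2 = 1) := by omega
        have hle : Nat.fib m ≤ 2 * Nat.fib (m + 1) :=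
          le_trans (Nat.fib_le_fib_succ) (Nat.le_mul_of_pos_left _ (by norm_num))
        simp only [if_neg hmod, hk2, Prod.mk.injEq]
        refine ⟨?_, ?_⟩
        · have hk : k = 2 * m := by omega
          rw [hk, Nat.fib_two_mul]
          push_cast [hle]
          ring
        · have hk : k + 1 = 2 * m + 1 := by omega
          rw [hk, Nat.fib_two_mul_add_one]
          push_cast
          ring
      · obtain ⟨m, hm⟩ := ho
        have hk2 : k / 2 = m := by omega
        have hmod : k % 2 = 1 := by omega
        have hle : Nat.fib (m + 1) ≤ 2 * Nat.fib (m + 1 + 1) :=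
          le_trans (Nat.fib_le_fib_succ) (Nat.le_mul_of_pos_left _ (by norm_num))
        simp only [if_pos hmod, hk2, Prod.mk.injEq]
        refine ⟨?_, ?_⟩
        · have hk : k = 2 * m + 1 := hm
          rw [hk, Nat.fib_two_mul_add_one]
          push_cast
          ring
        · have hk : k + 1 = 2 * (m + 1) := by omega
          rw [hk, Nat.fib_two_mul, Nat.fib_add_two]
          have hle2 : Nat.fib (m + 1) ≤ 2 * (Nat.fib m + Nat.fib (m + 1)) := by omega
          push_cast [hle2]
          ring

-- A's loop: folding m steps from (fib i, fib (i+1)) lands at (fib (i+m), fib (i+m+1))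
theorem pvLoop_eq (l : List Int) (i : Nat) :
    l.foldl (fun (st : Int × Int) _ => (st.2, st.1 + st.2))
      ((Nat.fib i : Int), (Nat.fib (i + 1) : Int))
    = ((Nat.fib (i + l.length) : Int), (Nat.fib (i + l.length + 1) : Int)) := by
  induction l generalizing i with
  | nil => simp
  | cons x xs ih =>
    simp only [List.foldl_cons, List.length_cons]
    have hstep : ((Nat.fib i : Int) + Nat.fib (i + 1)) = (Nat.fib (i + 1 + 1) : Int) := by
      rw [Nat.fib_add_two]; push_cast; ring
    rw [hstep, ih (i + 1)]
    have e : i + 1 + xs.length = i + (xs.length + 1) := by omega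
    rw [e]

-- ===== VERDICT (by name: the statement is the Claim_ definition above) =====
theorem run_solution_spec : Claim_equal_run_solution := by
  intro n _hd
  unfold Spec_run_solution run_solution run_solution_alt pvIterative
  by_cases h : n ≤ 2
  · simp [h]
  · rw [if_neg h, if_neg h]
    have h12 : ((1 : Int), (2 : Int)) = ((Nat.fib 2 : Int), (Nat.fib 3 : Int)) := by decide
    rw [h12, pvLoop_eq, PySem.List.length_pyRange_one, pvFd_eq]
    have e : 2 + (n + 1 - 3).toNat + 1 = (n + 1).toNat := by omega
    simp only [e]
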